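-- pv_equiv track=rewrite | github.com/SiddharthaShukla8/secure-network-config-auditor | checks.py | check_best_practices
-- ===== SOURCE A (Python) =====
-- def check_best_practices(cfg):
--     findings = []
--     raw = cfg.get("raw", [])
--
--     # service password-encryption missing
--     has_password = any("password " in l.lower() for l in raw)
--     has_encryption = any("service password-encryption" in l.lower() for l in raw)
--     if has_password and not has_encryption:
--         findings.append({
--             "issue": "Password encryption not enabled",
--             "severity": "MEDIUM",
--             "fix": "Add 'service password-encryption' to hide plain passwords in config."
--         })
--
--     # banner recommendation
--     if not any(l.lower().startswith("banner ") for l in raw):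
--         findings.append({
--             "issue": "Login banner not configured",
--             "severity": "LOW",
--             "fix": "Configure legal warning banner to discourage unauthorized access."
--         })
--
--     return findings
-- ===== SOURCE B (Python) =====
-- ENC_FINDING = {
--     "issue": "Password encryption not enabled",
--     "severity": "MEDIUM",
--     "fix": "Add 'service password-encryption' to hide plain passwords in config.",
-- }
-- BANNER_FINDING = {
--     "issue": "Login banner not configured",
--     "severity": "LOW",
--     "fix": "Configure legal warning banner to discourage unauthorized access.",
-- }
--
-- def _line_tags(line):
--     """Classify one config line into a set of feature tags."""
--     low = line.lower()
--     tags = set()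
--     if "password " in low:
--         tags.add("password")
--     if "service password-encryption" in low:
--         tags.add("encryption")
--     if low.startswith("banner "):
--         tags.add("banner")
--     return tags
--
-- # Declarative rule table: finding is emitted iff its condition holds of the tag set.
-- RULES = [
--     (lambda t: "password" in t and "encryption" not in t, ENC_FINDING),
--     (lambda t: "banner" not in t, BANNER_FINDING),
-- ]
--
-- def check_best_practices(cfg):
--     tags = set()
--     for l in cfg.get("raw", []):
--         tags |= _line_tags(l)
--     return [dict(finding) for cond, finding in RULES if cond(tags)]
-- ===== Notes on version B (the rewrite author's own statement) =====
-- stated objective: alternative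
-- what changed: B is a small rule engine: a per-line classifier maps each line to a set of feature tags, the tag sets are unioned over the config, and a declarative rule table (condition over the tag set, finding) is filtered to produce the findings; A instead runs three independent any() substring scans with inline if/append logic.
import Mathlib
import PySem

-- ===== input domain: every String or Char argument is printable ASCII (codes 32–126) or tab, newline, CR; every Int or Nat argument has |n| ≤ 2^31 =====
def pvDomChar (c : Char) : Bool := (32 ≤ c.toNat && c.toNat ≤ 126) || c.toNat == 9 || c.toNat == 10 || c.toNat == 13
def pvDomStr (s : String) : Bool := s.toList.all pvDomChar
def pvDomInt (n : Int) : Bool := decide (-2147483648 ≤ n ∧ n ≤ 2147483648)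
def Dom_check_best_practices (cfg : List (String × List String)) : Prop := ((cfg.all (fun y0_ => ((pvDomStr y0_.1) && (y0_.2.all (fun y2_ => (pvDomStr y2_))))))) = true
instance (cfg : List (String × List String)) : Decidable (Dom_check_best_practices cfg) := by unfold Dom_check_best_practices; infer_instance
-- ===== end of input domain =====

-- B recasts A's three inline any() scans as a rule engine: a per-line tag classifier, a union of tag sets, and a declarative rule table filtered over the summary; alternative decomposition, same cost class.

-- ===== PORT A =====
def pvEncFinding : List (String × String) :=
  [("issue", "Password encryption not enabled"),
   ("severity", "MEDIUM"),
   ("fix", "Add 'service password-encryption' to hide plain passwords in config.")]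

def pvBannerFinding : List (String × String) :=
  [("issue", "Login banner not configured"),
   ("severity", "LOW"),
   ("fix", "Configure legal warning banner to discourage unauthorized access.")]

def check_best_practices (cfg : List (String × List String)) : List (List (String × String)) :=
  let raw := (PySem.Dict.mk cfg).getD "raw" []
  let has_password := raw.any (fun l => PySem.Str.isIn "password " (PySem.Str.lower l))
  let has_encryption := raw.any (fun l => PySem.Str.isIn "service password-encryption" (PySem.Str.lower l))
  let findings := if has_password && !has_encryption then [pvEncFinding] else []
  if !(raw.any (fun l => PySem.Str.startswith (PySem.Str.lower l) "banner ")) then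
    findings ++ [pvBannerFinding]
  else findings

-- ===== PORT B =====
-- classify one line into a set of feature tags (B's _line_tags)
def cbpLineTags (line : String) : PySem.Set String :=
  let low := PySem.Str.lower line
  let t : PySem.Set String := PySem.Set.empty
  let t := if PySem.Str.isIn "password " low then PySem.Set.add t "password" else t
  let t := if PySem.Str.isIn "service password-encryption" low then PySem.Set.add t "encryption" else t
  let t := if PySem.Str.startswith low "banner " then PySem.Set.add t "banner" else t
  t

-- B's declarative rule table: condition over the tag set, paired with the finding
def cbpRules (tags : PySem.Set String) : List (Bool × List (String × String)) :=
  [(tags.contains "password" && !(tags.contains "encryption"), pvEncFinding),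
   (!(tags.contains "banner"), pvBannerFinding)]

def check_best_practices_alt (cfg : List (String × List String)) : List (List (String × String)) :=
  let raw := (PySem.Dict.mk cfg).getD "raw" []
  let tags := raw.foldl (fun (s : PySem.Set String) l => PySem.Set.union s (cbpLineTags l)) PySem.Set.empty
  ((cbpRules tags).filter (fun r => r.1)).map (fun r => r.2)

-- ===== PRECONDITION & SPEC =====
def Spec_check_best_practices (cfg : List (String × List String)) (out : List (List (String × String))) : Prop := out = check_best_practices_alt cfg
instance (cfg : List (String × List String)) (out : List (List (String × String))) : Decidable (Spec_check_best_practices cfg out) := by unfold Spec_check_best_practices; infer_instance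

-- ===== CLAIM (what is proved, stated in full; the proofs are below) =====
def Claim_equal_check_best_practices : Prop := ∀ (cfg : List (String × List String)), Dom_check_best_practices cfg → Spec_check_best_practices cfg (check_best_practices cfg)

-- ===== LEMMAS AND PROOFS =====
theorem mem_cbpLineTags (l : String) (y : String) :
    y ∈ cbpLineTags l ↔
      (y = "password" ∧ PySem.Str.isIn "password " (PySem.Str.lower l)) ∨
      (y = "encryption" ∧ PySem.Str.isIn "service password-encryption" (PySem.Str.lower l)) ∨
      (y = "banner" ∧ PySem.Str.startswith (PySem.Str.lower l) "banner ") := by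
  unfold cbpLineTags
  by_cases h1 : PySem.Str.isIn "password " (PySem.Str.lower l) <;>
  by_cases h2 : PySem.Str.isIn "service password-encryption" (PySem.Str.lower l) <;>
  by_cases h3 : PySem.Str.startswith (PySem.Str.lower l) "banner " <;>
    simp only [h1, h2, h3, if_true, ite_false] <;>
    simp [PySem.Set.add, PySem.Set.empty, PySem.Set.contains] <;> tauto

theorem mem_foldl_union (raw : List String) (s : PySem.Set String) (y : String) :
    y ∈ raw.foldl (fun (s : PySem.Set String) l => PySem.Set.union s (cbpLineTags l)) s ↔
      y ∈ s ∨ ∃ l ∈ raw, y ∈ cbpLineTags l := by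
  induction raw generalizing s with
  | nil => simp
  | cons x xs ih =>
    rw [List.foldl_cons, ih]
    simp only [PySem.Set.mem_union, List.mem_cons]
    constructor
    · rintro ((h | h) | ⟨l, hl, hy⟩)
      · exact Or.inl h
      · exact Or.inr ⟨x, Or.inl rfl, h⟩
      · exact Or.inr ⟨l, Or.inr hl, hy⟩
    · rintro (h | ⟨l, (rfl | hl), hy⟩)
      · exact Or.inl (Or.inl h)
      · exact Or.inl (Or.inr hy)
      · exact Or.inr ⟨l, hl, hy⟩

theorem contains_fold (cfg : List (String × List String)) (t : String) :
    (((PySem.Dict.mk cfg).getD "raw" []).foldl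
        (fun (s : PySem.Set String) l => PySem.Set.union s (cbpLineTags l)) PySem.Set.empty).contains t
      = ((PySem.Dict.mk cfg).getD "raw" []).any (fun l => decide (t ∈ cbpLineTags l)) := by
  rw [Bool.eq_iff_iff]
  simp [mem_foldl_union, PySem.Set.empty, List.any_eq_true]

-- ===== VERDICT (by name: the statement is the Claim_ definition above) =====
theorem check_best_practices_spec : Claim_equal_check_best_practices := by
  intro cfg _
  unfold Spec_check_best_practices check_best_practices check_best_practices_alt cbpRules
  simp only [contains_fold]
  have htag : ∀ (t : String) (p : String → Bool),
      (∀ l, decide (t ∈ cbpLineTags l) = p l) →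
      ((PySem.Dict.mk cfg).getD "raw" []).any (fun l => decide (t ∈ cbpLineTags l))
        = ((PySem.Dict.mk cfg).getD "raw" []).any p := by
    intro t p h; simp only [h]
  rw [htag "password" (fun l => PySem.Str.isIn "password " (PySem.Str.lower l))
        (by intro l; simp [mem_cbpLineTags]),
      htag "encryption" (fun l => PySem.Str.isIn "service password-encryption" (PySem.Str.lower l))
        (by intro l; simp [mem_cbpLineTags]),
      htag "banner" (fun l => PySem.Str.startswith (PySem.Str.lower l) "banner ")
        (by intro l; simp [mem_cbpLineTags])]
  cases hp : ((PySem.Dict.mk cfg).getD "raw" []).any (fun l => PySem.Str.isIn "password " (PySem.Str.lower l)) <;>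
  cases he : ((PySem.Dict.mk cfg).getD "raw" []).any (fun l => PySem.Str.isIn "service password-encryption" (PySem.Str.lower l)) <;>
  cases hb : ((PySem.Dict.mk cfg).getD "raw" []).any (fun l => PySem.Str.startswith (PySem.Str.lower l) "banner ")  <;>
    simp [List.filter]
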